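-- pv_equiv track=rewrite | github.com/OsamaASidd/nlp-resume-parser | application/parser.py | preprocess_resume_text
-- ===== SOURCE A (Python) =====
-- def preprocess_resume_text(text: str) -> str:
--     """
--     Smart preprocessing to extract only relevant sections quickly.
--     """
--     # Define sections to prioritize
--     important_sections = [
--         'education', 'experience', 'work', 'employment', 'projects',
--         'skills', 'contact', 'email', 'phone', 'address', 'certificates',
--         'certifications', 'extracurricular', 'activities', 'volunteer'
--     ]
--
--     lines = text.split('\n')
--     relevant_lines = []
--     current_section_important = False
--
--     for line in lines:
--         line_lower = line.lower().strip()
--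
--         # Check if line contains contact info (always important)
--         if any(keyword in line_lower for keyword in ['@', 'phone', 'email', 'linkedin', 'github']):
--             relevant_lines.append(line)
--             continue
--
--         # Check if line is a section header
--         if any(section in line_lower for section in important_sections):
--             current_section_important = True
--             relevant_lines.append(line)
--             continue
--
--         # If we're in an important section, keep the line
--         if current_section_important and line.strip():
--             relevant_lines.append(line)
--
--         # Reset section importance on empty line (potential section break)
--         if not line.strip():
--             current_section_important = False
--
--     return '\n'.join(relevant_lines)
-- ===== SOURCE B (Python) =====
-- def preprocess_resume_text(text: str) -> str:
--     """
--     Smart preprocessing to extract only relevant sections quickly.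
--     Block-based re-implementation: group consecutive non-blank lines into
--     blocks (whitespace-only lines separate blocks and are never emitted);
--     per block, find the first non-contact line matching a section keyword,
--     keep only contact lines before it and everything from it onward.
--     """
--     important_sections = [
--         'education', 'experience', 'work', 'employment', 'projects',
--         'skills', 'contact', 'email', 'phone', 'address', 'certificates',
--         'certifications', 'extracurricular', 'activities', 'volunteer'
--     ]
--     contact_keywords = ['@', 'phone', 'email', 'linkedin', 'github']
--
--     def is_contact(line):
--         low = line.lower().strip()
--         return any(k in low for k in contact_keywords)
--
--     def is_header(line):
--         low = line.lower().strip()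
--         return any(s in low for s in important_sections)
--
--     def header_index(block):
--         for i, line in enumerate(block):
--             if not is_contact(line) and is_header(line):
--                 return i
--         return len(block)
--
--     blocks = []
--     current = []
--     for line in text.split('\n'):
--         if line.strip():
--             current.append(line)
--         else:
--             blocks.append(current)
--             current = []
--     blocks.append(current)
--
--     out = []
--     for block in blocks:
--         h = header_index(block)
--         out.extend(line for line in block[:h] if is_contact(line))
--         out.extend(block[h:])
--     return '\n'.join(out)
-- ===== Notes on version B (the rewrite author's own statement) =====
-- stated objective: alternative
-- what changed: Replaces A's single pass with a persistent current_section_important flag by a block decomposition: whitespace-only lines split the text into blocks, and each block keeps its contact lines plus everything from its first non-contact section-header line onward.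
import Mathlib
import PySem

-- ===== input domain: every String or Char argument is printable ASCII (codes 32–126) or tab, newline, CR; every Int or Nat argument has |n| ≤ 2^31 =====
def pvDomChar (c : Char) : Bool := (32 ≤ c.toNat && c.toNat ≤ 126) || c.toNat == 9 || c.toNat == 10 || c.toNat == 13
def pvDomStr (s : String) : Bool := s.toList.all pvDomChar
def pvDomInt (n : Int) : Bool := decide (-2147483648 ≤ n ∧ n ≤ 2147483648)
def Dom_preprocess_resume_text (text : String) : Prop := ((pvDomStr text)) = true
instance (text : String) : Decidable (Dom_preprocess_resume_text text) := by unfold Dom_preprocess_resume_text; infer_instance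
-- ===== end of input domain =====

-- B replaces A's persistent section flag by a block decomposition: whitespace-only
-- lines split the text into blocks, and each block keeps its contact lines plus
-- everything from its first non-contact section-header line on (objective: alternative).

-- ===== PORT A =====
-- A's named constant 'important_sections'
def pvSections : List String :=
  ["education", "experience", "work", "employment", "projects",
   "skills", "contact", "email", "phone", "address", "certificates",
   "certifications", "extracurricular", "activities", "volunteer"]

-- A's loop body: state = (relevant_lines, current_section_important)
def pvStepA (st : List String × Bool) (line : String) : List String × Bool :=
  let line_lower := PySem.Str.strip (PySem.Str.lower line)
  if ["@", "phone", "email", "linkedin", "github"].any (fun k => PySem.Str.isIn k line_lower) then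
    (st.1 ++ [line], st.2)
  else if pvSections.any (fun s => PySem.Str.isIn s line_lower) then
    (st.1 ++ [line], true)
  else
    (if st.2 && !(PySem.Str.strip line == "") then st.1 ++ [line] else st.1,
     if PySem.Str.strip line == "" then false else st.2)

def preprocess_resume_text (text : String) : String :=
  let lines := (PySem.Str.split? text "\n").getD []   -- sep "\n" ≠ "": split? is `some` here
  PySem.Str.join "\n" (lines.foldl pvStepA ([], false)).1

-- ===== PORT B =====
def pvIsContact (line : String) : Bool :=
  ["@", "phone", "email", "linkedin", "github"].any
    (fun k => PySem.Str.isIn k (PySem.Str.strip (PySem.Str.lower line)))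

def pvIsHeader (line : String) : Bool :=
  pvSections.any (fun s => PySem.Str.isIn s (PySem.Str.strip (PySem.Str.lower line)))

-- Source B's header_index: first non-contact line matching a section keyword, else len(block)
def pvHeaderIdx : List String → Nat
  | [] => 0
  | line :: rest => if !pvIsContact line && pvIsHeader line then 0 else pvHeaderIdx rest + 1

-- block[:h] / block[h:] with 0 ≤ h ≤ len(block), so take/drop are exact here
def pvEmitBlock (block : List String) : List String :=
  let h := pvHeaderIdx block
  (block.take h).filter (fun line => pvIsContact line) ++ block.drop h

-- Source B's grouping loop body: state = (blocks, current)
def pvStepB (st : List (List String) × List String) (line : String) : List (List String) × List String :=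
  if !(PySem.Str.strip line == "") then (st.1, st.2 ++ [line])
  else (st.1 ++ [st.2], [])

def preprocess_resume_text_alt (text : String) : String :=
  let st := ((PySem.Str.split? text "\n").getD []).foldl pvStepB ([], [])
  let blocks := st.1 ++ [st.2]
  PySem.Str.join "\n" (blocks.foldl (fun out block => out ++ pvEmitBlock block) [])

-- ===== PRECONDITION & SPEC =====
def Spec_preprocess_resume_text (text : String) (out : String) : Prop := out = preprocess_resume_text_alt text
instance (text : String) (out : String) : Decidable (Spec_preprocess_resume_text text out) := by unfold Spec_preprocess_resume_text; infer_instance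

-- ===== CLAIM (what is proved, stated in full; the proofs are below) =====
def Claim_equal_preprocess_resume_text : Prop := ∀ (text : String), Dom_preprocess_resume_text text → Spec_preprocess_resume_text text (preprocess_resume_text text)

-- ===== LEMMAS AND PROOFS =====

-- the lines A's loop emits from `ls` when the flag starts at `f`
def pvEmitA (f : Bool) : List String → List String
  | [] => []
  | l :: ls =>
    if pvIsContact l then l :: pvEmitA f ls
    else if pvIsHeader l then l :: pvEmitA true ls
    else if PySem.Str.strip l == "" then pvEmitA false ls
    else if f then l :: pvEmitA f ls
    else pvEmitA f ls

-- the block list Source B's grouping loop produces from `ls` with `current = cur`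
def pvBlocks (cur : List String) : List String → List (List String)
  | [] => [cur]
  | l :: ls => if PySem.Str.strip l == "" then cur :: pvBlocks [] ls else pvBlocks (cur ++ [l]) ls

def pvHasHeader (cur : List String) : Bool := cur.any (fun l => !pvIsContact l && pvIsHeader l)

theorem pvStepA_eq (st : List String × Bool) (l : String) :
    pvStepA st l =
      if pvIsContact l then (st.1 ++ [l], st.2)
      else if pvIsHeader l then (st.1 ++ [l], true)
      else if PySem.Str.strip l == "" then (st.1, false)
      else (if st.2 then st.1 ++ [l] else st.1, st.2) := by
  unfold pvStepA pvIsContact pvIsHeader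
  split_ifs with h1 h2 h3 <;> simp_all

theorem pvFoldA_eq (ls : List String) (acc : List String) (f : Bool) :
    (ls.foldl pvStepA (acc, f)).1 = acc ++ pvEmitA f ls := by
  induction ls generalizing acc f with
  | nil => simp [pvEmitA]
  | cons l ls ih =>
    rw [List.foldl_cons, pvStepA_eq]
    by_cases hc : pvIsContact l
    · simp [pvEmitA, hc, ih]
    · by_cases hh : pvIsHeader l
      · simp [pvEmitA, hc, hh, ih]
      · by_cases hb : PySem.Str.strip l == ""
        · simp [pvEmitA, hc, hh, hb, ih]
        · cases f <;> simp [pvEmitA, hc, hh, hb, ih]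

theorem pvFoldB_eq (ls : List String) (bs : List (List String)) (cur : List String) :
    (ls.foldl pvStepB (bs, cur)).1 ++ [(ls.foldl pvStepB (bs, cur)).2] = bs ++ pvBlocks cur ls := by
  induction ls generalizing bs cur with
  | nil => simp [pvBlocks]
  | cons l ls ih =>
    simp only [List.foldl_cons, pvStepB, pvBlocks]
    by_cases hb : PySem.Str.strip l == "" <;> simp [hb, ih]

-- a whitespace-only line: all its characters are space characters
theorem pvStripNil_all_isspace (cs : List Char) (h : PySem.Chars.strip cs = []) :
    ∀ c ∈ cs, PySem.Chars.isspace c = true := by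
  unfold PySem.Chars.strip PySem.Chars.rstrip PySem.Chars.lstrip at h
  rw [List.reverse_eq_nil_iff, List.dropWhile_eq_nil_iff] at h
  intro c hc
  rw [← List.takeWhile_append_dropWhile (p := PySem.Chars.isspace) (l := cs)] at hc
  rcases List.mem_append.mp hc with h1 | h1
  · exact List.mem_takeWhile_imp h1
  · exact h c (List.mem_reverse.mpr h1)

theorem pvIsspace_lowerChar (c : Char) (h : PySem.Chars.isspace c = true) :
    PySem.Chars.lowerChar c = c := by
  unfold PySem.Chars.lowerChar PySem.Chars.isupper
  unfold PySem.Chars.isspace at h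
  split_ifs with hu
  · exfalso
    simp only [Bool.and_eq_true, decide_eq_true_eq, Char.le_def] at hu
    simp only [Bool.or_eq_true, Bool.and_eq_true, decide_eq_true_eq] at h
    obtain ⟨ha, hz⟩ := hu
    have ha' : 65 ≤ c.toNat := ha
    have hz' : c.toNat ≤ 90 := hz
    omega
  · rfl

theorem pvBlank_not_contact_header (l : String) (h : PySem.Str.strip l = "") :
    pvIsContact l = false ∧ pvIsHeader l = false := by
  have hl : PySem.Chars.strip l.toList = [] := by
    have := congrArg String.toList h
    simpa using this
  have hsp := pvStripNil_all_isspace _ hl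
  have hmap : PySem.Chars.lower l.toList = l.toList := by
    unfold PySem.Chars.lower
    have : l.toList.map PySem.Chars.lowerChar = l.toList.map id :=
      List.map_congr_left (fun c hc => by rw [pvIsspace_lowerChar c (hsp c hc)]; rfl)
    simpa using this
  have hlow : PySem.Str.strip (PySem.Str.lower l) = "" := by
    apply String.toList_eq_nil_iff.mp
    simp [hmap, hl]
  constructor
  · unfold pvIsContact; rw [hlow]; decide
  · unfold pvIsHeader; rw [hlow]; decide

theorem pvHeaderIdx_of_not_hasHeader (cur : List String) (h : pvHasHeader cur = false) :
    pvHeaderIdx cur = cur.length := by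
  induction cur with
  | nil => simp [pvHeaderIdx]
  | cons l ls ih =>
    simp only [pvHasHeader, List.any_cons, Bool.or_eq_false_iff] at h
    rw [pvHeaderIdx, if_neg (by simp [h.1]), ih h.2]
    simp

theorem pvHeaderIdx_of_hasHeader (cur : List String) (h : pvHasHeader cur = true) :
    pvHeaderIdx cur < cur.length := by
  induction cur with
  | nil => simp [pvHasHeader] at h
  | cons l ls ih =>
    rw [pvHeaderIdx]
    split_ifs with hl
    · simp
    · simp only [pvHasHeader, List.any_cons, hl, Bool.false_or] at h
      have := ih h
      simp only [List.length_cons]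
      omega

theorem pvHasHeader_cons (x : String) (xs : List String) :
    pvHasHeader (x :: xs) = ((!pvIsContact x && pvIsHeader x) || pvHasHeader xs) := by
  simp [pvHasHeader]

theorem pvHeaderIdx_append_one (cur : List String) (l : String) :
    pvHeaderIdx (cur ++ [l]) =
      if pvHasHeader cur then pvHeaderIdx cur
      else if !pvIsContact l && pvIsHeader l then cur.length else cur.length + 1 := by
  induction cur with
  | nil => simp only [List.nil_append, pvHeaderIdx, pvHasHeader]; split_ifs <;> simp_all [pvHeaderIdx]
  | cons x xs ih =>
    rw [List.cons_append, pvHeaderIdx, pvHeaderIdx, ih, pvHasHeader_cons]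
    by_cases hx : (!pvIsContact x && pvIsHeader x) = true
    · simp [hx]
    · simp only [hx, Bool.false_or, if_false]
      split_ifs <;> (try simp only [List.length_cons]) <;> first | omega | exact ((by assumption : False).elim)

theorem pvEmitBlock_append_one (cur : List String) (l : String) :
    pvEmitBlock (cur ++ [l]) =
      pvEmitBlock cur ++ (if pvIsContact l || pvHasHeader cur || pvIsHeader l then [l] else []) := by
  unfold pvEmitBlock
  dsimp only
  rw [pvHeaderIdx_append_one]
  by_cases hH : pvHasHeader cur = true
  · have hlt := pvHeaderIdx_of_hasHeader cur hH
    rw [if_pos hH, List.take_append_of_le_length (le_of_lt hlt),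
        List.drop_append_of_le_length (le_of_lt hlt)]
    simp [hH]
  · have hlen := pvHeaderIdx_of_not_hasHeader cur (by simpa using hH)
    rw [if_neg hH]
    by_cases hl : (!pvIsContact l && pvIsHeader l) = true
    · rw [if_pos hl, List.take_append_of_le_length (le_refl _),
        List.drop_append_of_le_length (le_refl _)]
      simp only [List.take_length, List.drop_length, hlen]
      have : pvIsHeader l = true := by simp_all
      simp [this]
    · rw [if_neg hl]
      have h1 : (cur ++ [l]).take (cur.length + 1) = cur ++ [l] := by
        apply List.take_of_length_le; simp
      have h2 : (cur ++ [l]).drop (cur.length + 1) = [] := by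
        apply List.drop_eq_nil_of_le; simp
      rw [h1, h2, hlen]
      simp only [List.take_length, List.drop_length, List.filter_append, List.append_nil]
      cases hcl : pvIsContact l <;> cases hhl : pvIsHeader l <;> simp_all [pvHasHeader]

theorem pvHasHeader_append_one (cur : List String) (l : String) :
    pvHasHeader (cur ++ [l]) = (pvHasHeader cur || (!pvIsContact l && pvIsHeader l)) := by
  simp [pvHasHeader, List.any_append]

theorem pvMain (ls : List String) (cur : List String)
    (hcur : ∀ l ∈ cur, ¬ PySem.Str.strip l = "") :
    pvEmitBlock cur ++ pvEmitA (pvHasHeader cur) ls = (pvBlocks cur ls).flatMap pvEmitBlock := by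
  induction ls generalizing cur with
  | nil => simp [pvBlocks, pvEmitA]
  | cons l ls ih =>
    by_cases hb : PySem.Str.strip l = ""
    · obtain ⟨hc, hh⟩ := pvBlank_not_contact_header l hb
      have e1 : pvEmitA (pvHasHeader cur) (l :: ls) = pvEmitA false ls := by
        rw [pvEmitA]; simp [hc, hh, hb]
      rw [pvBlocks, if_pos (by simp [hb]), e1]
      have hE := ih [] (by simp)
      have h0 : pvHasHeader ([] : List String) = false := by simp [pvHasHeader]
      have hB0 : pvEmitBlock ([] : List String) = [] := by simp [pvEmitBlock, pvHeaderIdx]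
      rw [h0, hB0] at hE
      simp only [List.nil_append] at hE
      rw [List.flatMap_cons, ← hE]
    · rw [pvBlocks, if_neg (by simp [hb]),
        ← ih (cur ++ [l]) (by
          intro x hx
          rcases List.mem_append.mp hx with h | h
          · exact hcur x h
          · simp only [List.mem_singleton] at h; subst h; exact hb),
        pvEmitBlock_append_one, pvHasHeader_append_one, pvEmitA]
      cases hcl : pvIsContact l <;> cases hhl : pvIsHeader l <;> cases hf : pvHasHeader cur <;>
        simp [hb, List.append_assoc]

-- ===== VERDICT (by name: the statement is the Claim_ definition above) =====
theorem preprocess_resume_text_spec : Claim_equal_preprocess_resume_text := by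
  intro text _
  unfold Spec_preprocess_resume_text preprocess_resume_text preprocess_resume_text_alt
  dsimp only
  rw [pvFoldA_eq, ← List.flatMap_eq_foldl, pvFoldB_eq]
  have h0 : pvHasHeader ([] : List String) = false := by simp [pvHasHeader]
  have hB0 : pvEmitBlock ([] : List String) = [] := by simp [pvEmitBlock, pvHeaderIdx]
  have := pvMain ((PySem.Str.split? text "\n").getD []) [] (by simp)
  rw [h0, hB0] at this
  simp only [List.nil_append] at this ⊢
  rw [this]
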